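/- GENERATED by c/gen_decode.py: every decode fact of the image. -/
import ProgX.Base.Dec.All
import Toyh.Dec.D000
import Toyh.Dec.D001
import Toyh.Dec.D002
import Toyh.Dec.D003
import Toyh.Dec.D004
import Toyh.Dec.D005
import Toyh.Dec.D006
import Toyh.Dec.D007
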